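-- pv_equiv track=rewrite | github.com/SuperGaGaDragon/CyBEr1924 | multi_agent_platform/run_flow.py | _parse_reviewer_response
-- ===== SOURCE A (Python) =====
-- from typing import Tuple, Optional, Dict, Any, List, Callable
--
-- def _parse_reviewer_response(decision_text: str) -> Tuple[str, str, Optional[str]]:
--     """
--     Parse reviewer/coordinator output into (decision, reason, revised_text).
--     Recognizes an optional block starting with REVISED_TEXT: or REVISED:.
--     """
--     lines = [line.strip() for line in (decision_text or "").strip().splitlines() if line.strip()]
--     if not lines:
--         return "ACCEPT", "", None
--     decision_line = lines[0].upper()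
--     decision = "ACCEPT" if "ACCEPT" in decision_line else "REDO"
--     remaining = lines[1:]
--     revised_lines: list[str] = []
--     reason_lines: list[str] = []
--     capture_revised = False
--     for line in remaining:
--         lower = line.lower()
--         if lower.startswith("revised_text:") or lower.startswith("revised:"):
--             capture_revised = True
--             revised_lines.append(line.split(":", 1)[1].strip())
--             continue
--         if capture_revised:
--             revised_lines.append(line)
--         else:
--             reason_lines.append(line)
--     revised_text = "\n".join(revised_lines).strip() or None
--     reason = "\n".join(reason_lines).strip()
--     return decision, reason, revised_text
-- ===== SOURCE B (Python) =====
-- def _parse_reviewer_response(decision_text):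
--     lines = [line.strip() for line in (decision_text or "").strip().splitlines() if line.strip()]
--     if not lines:
--         return "ACCEPT", "", None
--     decision = "ACCEPT" if "ACCEPT" in lines[0].upper() else "REDO"
--     remaining = lines[1:]
--
--     def is_marker(line):
--         l = line.lower()
--         return l.startswith("revised_text:") or l.startswith("revised:")
--
--     i = 0
--     reason_part = []
--     while i < len(remaining) and not is_marker(remaining[i]):
--         reason_part.append(remaining[i])
--         i += 1
--     reason = "\n".join(reason_part).strip()
--     revised_lines = [line.split(":", 1)[1].strip() if is_marker(line) else line
--                      for line in remaining[i:]]
--     revised_text = "\n".join(revised_lines).strip() or None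
--     return decision, reason, revised_text
-- ===== Notes on version B (the rewrite author's own statement) =====
-- stated objective: alternative
-- what changed: Replaces the capture_revised flag-driven single loop with a split of the remaining lines at the first marker line (takeWhile/dropWhile): reason is the prefix joined, and the revised block is a map over the suffix that re-splits marker lines.
import Mathlib
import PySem

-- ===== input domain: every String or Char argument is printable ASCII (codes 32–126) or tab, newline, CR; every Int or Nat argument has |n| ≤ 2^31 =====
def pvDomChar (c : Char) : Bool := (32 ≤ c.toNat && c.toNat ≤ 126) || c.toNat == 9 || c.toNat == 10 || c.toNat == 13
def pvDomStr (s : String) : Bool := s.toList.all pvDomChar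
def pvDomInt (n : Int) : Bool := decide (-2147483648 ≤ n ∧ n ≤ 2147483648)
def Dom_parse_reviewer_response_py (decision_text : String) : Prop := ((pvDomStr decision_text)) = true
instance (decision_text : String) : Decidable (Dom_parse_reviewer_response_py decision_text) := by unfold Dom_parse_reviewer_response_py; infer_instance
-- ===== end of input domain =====

-- B replaces A's capture_revised flag loop with a split at the first marker line
-- (takeWhile/dropWhile + map); alternative decomposition, same cost, return value identical.

-- ===== PORT A =====
-- shared line normalization: [line.strip() for line in text.strip().splitlines() if line.strip()]
def pvNorm (s : String) : List String :=
  ((PySem.Str.splitlines (PySem.Str.strip s)).map PySem.Str.strip).filter (fun l => l ≠ "")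

-- line.lower().startswith("revised_text:") or line.lower().startswith("revised:")
def pvIsMarker (line : String) : Bool :=
  PySem.Str.startswith (PySem.Str.lower line) "revised_text:" ||
  PySem.Str.startswith (PySem.Str.lower line) "revised:"

-- line.split(":", 1)[1].strip()  (a marker line always contains ':', so index 1 exists)
def pvPostColon (line : String) : String :=
  PySem.Str.strip (((PySem.Str.splitMax? line ":" 1).getD []).getD 1 "")

def parse_reviewer_response_py (decision_text : String) : String × String × Option String :=
  match pvNorm decision_text with
  | [] => ("ACCEPT", "", none)
  | l0 :: remaining =>
    let decision := if PySem.Str.isIn "ACCEPT" (PySem.Str.upper l0) then "ACCEPT" else "REDO"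
    let st := remaining.foldl
      (fun (st : Bool × List String × List String) line =>
        if pvIsMarker line then (true, st.2.1 ++ [pvPostColon line], st.2.2)
        else if st.1 then (true, st.2.1 ++ [line], st.2.2)
        else (st.1, st.2.1, st.2.2 ++ [line]))
      (false, [], [])
    let revised_text := PySem.Str.strip (PySem.Str.join "\n" st.2.1)
    let reason := PySem.Str.strip (PySem.Str.join "\n" st.2.2)
    (decision, reason, if revised_text == "" then none else some revised_text)

-- ===== PORT B =====
def parse_reviewer_response_py_alt (decision_text : String) : String × String × Option String :=
  match pvNorm decision_text with
  | [] => ("ACCEPT", "", none)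
  | l0 :: remaining =>
    let decision := if PySem.Str.isIn "ACCEPT" (PySem.Str.upper l0) then "ACCEPT" else "REDO"
    let reason := PySem.Str.strip (PySem.Str.join "\n" (remaining.takeWhile (fun l => !pvIsMarker l)))
    let revised := (remaining.dropWhile (fun l => !pvIsMarker l)).map
      (fun line => if pvIsMarker line then pvPostColon line else line)
    let rt := PySem.Str.strip (PySem.Str.join "\n" revised)
    (decision, reason, if rt == "" then none else some rt)

-- ===== PRECONDITION & SPEC =====
def Spec_parse_reviewer_response_py (decision_text : String) (out : String × String × Option String) : Prop := out = parse_reviewer_response_py_alt decision_text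
instance (decision_text : String) (out : String × String × Option String) : Decidable (Spec_parse_reviewer_response_py decision_text out) := by unfold Spec_parse_reviewer_response_py; infer_instance

-- ===== CLAIM (what is proved, stated in full; the proofs are below) =====
def Claim_equal_parse_reviewer_response_py : Prop := ∀ (decision_text : String), Dom_parse_reviewer_response_py decision_text → Spec_parse_reviewer_response_py decision_text (parse_reviewer_response_py decision_text)

-- ===== LEMMAS AND PROOFS =====

-- once capture_revised is true, every later line goes to revised_lines (re-split if a marker)
theorem pvFoldTrue (l : List String) (rev rea : List String) :
    l.foldl
      (fun (st : Bool × List String × List String) line =>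
        if pvIsMarker line then (true, st.2.1 ++ [pvPostColon line], st.2.2)
        else if st.1 then (true, st.2.1 ++ [line], st.2.2)
        else (st.1, st.2.1, st.2.2 ++ [line]))
      (true, rev, rea)
    = (true, rev ++ l.map (fun line => if pvIsMarker line then pvPostColon line else line), rea) := by
  induction l generalizing rev with
  | nil => simp
  | cons x t ih =>
    by_cases h : pvIsMarker x = true <;> simp [List.foldl_cons, h, ih]

-- before any marker is seen, lines accumulate into reason_lines; the loop switches at the first marker
theorem pvFoldFalse (l : List String) (rea : List String) :
    l.foldl
      (fun (st : Bool × List String × List String) line =>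
        if pvIsMarker line then (true, st.2.1 ++ [pvPostColon line], st.2.2)
        else if st.1 then (true, st.2.1 ++ [line], st.2.2)
        else (st.1, st.2.1, st.2.2 ++ [line]))
      (false, [], rea)
    = (!(l.dropWhile (fun x => !pvIsMarker x)).isEmpty,
       (l.dropWhile (fun x => !pvIsMarker x)).map (fun line => if pvIsMarker line then pvPostColon line else line),
       rea ++ l.takeWhile (fun x => !pvIsMarker x)) := by
  induction l generalizing rea with
  | nil => simp
  | cons x t ih =>
    by_cases h : pvIsMarker x = true
    · simp [List.foldl_cons, h, pvFoldTrue]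
    · simp [List.foldl_cons, h, ih]

-- ===== VERDICT (by name: the statement is the Claim_ definition above) =====
theorem parse_reviewer_response_py_spec : Claim_equal_parse_reviewer_response_py := by
  intro s _
  unfold Spec_parse_reviewer_response_py parse_reviewer_response_py parse_reviewer_response_py_alt
  cases h : pvNorm s with
  | nil => rfl
  | cons l0 remaining => simp [pvFoldFalse]
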